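-- pv_equiv track=rewrite | github.com/aidops/schema.aidops.org | scripts/emit_preview_bundles.py | pick_locale
-- ===== SOURCE A (Python) =====
-- DEFAULT_LOCALE = "en"
--
-- def pick_locale(field: dict[str, str] | None, locale: str) -> tuple[str, str]:
--     """Return (value, locale_used). Falls back to en, then any non-empty entry."""
--     if not field:
--         return "", locale
--     val = field.get(locale)
--     if val:
--         return val, locale
--     val = field.get(DEFAULT_LOCALE)
--     if val:
--         return val, DEFAULT_LOCALE
--     for loc, v in field.items():
--         if v:
--             return v, loc
--     return "", locale
-- ===== SOURCE B (Python) =====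
-- DEFAULT_LOCALE = "en"
--
-- def pick_locale(field: "dict[str, str] | None", locale: str) -> "tuple[str, str]":
--     # Single pass: among non-empty entries, keep the one with the lowest
--     # priority rank (requested locale < en < anything), first occurrence wins ties.
--     best = None  # (rank, value, key)
--     for loc, v in (field or {}).items():
--         if v:
--             rank = 0 if loc == locale else (1 if loc == DEFAULT_LOCALE else 2)
--             if best is None or rank < best[0]:
--                 best = (rank, v, loc)
--     return ("", locale) if best is None else (best[1], best[2])
-- ===== Notes on version B (the rewrite author's own statement) =====
-- stated objective: alternative
-- what changed: Replaces the staged lookups (locale get, en get, then an items() scan) with a single pass over the entries that keeps an argmin accumulator of (priority rank, value, key), where rank orders requested locale < en < other; no dict lookups at all.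
import Mathlib
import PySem

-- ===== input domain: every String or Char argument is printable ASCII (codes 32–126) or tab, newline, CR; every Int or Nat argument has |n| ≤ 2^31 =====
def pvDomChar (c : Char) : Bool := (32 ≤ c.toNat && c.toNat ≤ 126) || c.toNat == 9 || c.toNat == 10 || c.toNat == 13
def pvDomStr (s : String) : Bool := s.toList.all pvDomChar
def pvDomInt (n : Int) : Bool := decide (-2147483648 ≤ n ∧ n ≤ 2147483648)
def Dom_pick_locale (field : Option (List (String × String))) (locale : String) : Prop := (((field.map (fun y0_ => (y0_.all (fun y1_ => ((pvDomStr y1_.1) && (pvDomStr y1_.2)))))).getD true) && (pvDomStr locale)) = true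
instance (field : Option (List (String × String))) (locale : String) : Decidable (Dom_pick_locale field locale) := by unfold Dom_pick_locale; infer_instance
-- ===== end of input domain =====

-- B replaces the staged lookups + items() scan with one argmin-by-priority-rank pass; objective: alternative.

-- ===== PORT A =====
-- the 'for loc, v in field.items(): if v: return v, loc' loop
def pickItemsLoop (items : List (String × String)) (locale : String) : String × String :=
  match items with
  | [] => ("", locale)
  | (loc, v) :: rest => if v ≠ "" then (v, loc) else pickItemsLoop rest locale

def pick_locale (field : Option (List (String × String))) (locale : String) : String × String :=
  match field with
  | none => ("", locale)
  | some pairs =>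
    let d := PySem.Dict.ofList pairs
    if d.items = [] then ("", locale)          -- 'if not field'
    else
      let val := (d.get? locale).getD ""       -- field.get(locale); truthiness of str = nonempty
      if val ≠ "" then (val, locale)
      else
        let val2 := (d.get? "en").getD ""      -- field.get(DEFAULT_LOCALE)
        if val2 ≠ "" then (val2, "en")
        else pickItemsLoop d.items locale

-- ===== PORT B =====
-- rank = 0 if loc == locale else (1 if loc == "en" else 2)
def pvRank (loc locale : String) : Nat :=
  if loc = locale then 0 else if loc = "en" then 1 else 2

-- loop body: 'if v: … if best is None or rank < best[0]: best = (rank, v, loc)'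
def pvStep (locale : String) (best : Option (Nat × String × String)) (p : String × String) :
    Option (Nat × String × String) :=
  if p.2 ≠ "" then
    match best with
    | none => some (pvRank p.1 locale, p.2, p.1)
    | some b => if pvRank p.1 locale < b.1 then some (pvRank p.1 locale, p.2, p.1) else some b
  else best

def pick_locale_alt (field : Option (List (String × String))) (locale : String) : String × String :=
  let d := PySem.Dict.ofList (field.getD [])   -- '(field or {})'
  match d.items.foldl (pvStep locale) none with
  | none => ("", locale)
  | some b => (b.2.1, b.2.2)

-- ===== PRECONDITION & SPEC =====
def Spec_pick_locale (field : Option (List (String × String))) (locale : String) (out : String × String) : Prop := out = pick_locale_alt field locale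
instance (field : Option (List (String × String))) (locale : String) (out : String × String) : Decidable (Spec_pick_locale field locale out) := by unfold Spec_pick_locale; infer_instance

-- ===== CLAIM (what is proved, stated in full; the proofs are below) =====
def Claim_equal_pick_locale : Prop := ∀ (field : Option (List (String × String))) (locale : String), Dom_pick_locale field locale → Spec_pick_locale field locale (pick_locale field locale)

-- ===== LEMMAS AND PROOFS =====

-- a rank-0 accumulator is final
theorem fold_fix_zero (items : List (String × String)) (locale : String) (v l : String) :
    items.foldl (pvStep locale) (some (0, v, l)) = some (0, v, l) := by
  induction items with
  | nil => rfl
  | cons p rest ih =>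
    simp only [List.foldl, pvStep]
    by_cases h : p.2 ≠ ""
    · rw [if_pos h, if_neg (by omega)]; exact ih
    · rw [if_neg h]; exact ih

-- an accumulator of rank ≤ r survives a step when truthy entries of rank ≥ r can't beat it; stated per step
theorem step_rank_ge (locale : String) (acc : Option (Nat × String × String))
    (p : String × String) (r : Nat) (hacc : ∀ b, acc = some b → r ≤ b.1)
    (hp : p.2 ≠ "" → r ≤ pvRank p.1 locale) :
    ∀ b, pvStep locale acc p = some b → r ≤ b.1 := by
  intro b hb
  unfold pvStep at hb
  by_cases h : p.2 ≠ ""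
  · rw [if_pos h] at hb
    cases acc with
    | none => injection hb with hb; rw [← hb]; exact hp h
    | some a =>
      have ha := hacc a rfl
      simp only at hb
      split_ifs at hb with hlt <;> (injection hb with hb; rw [← hb])
      · exact hp h
      · exact ha
  · rw [if_neg h] at hb
    exact hacc b hb

-- if the requested locale has a truthy entry, the fold finds it (acc none or rank ≥ 1)
theorem fold_finds_locale (items : List (String × String)) (locale v : String)
    (hnd : (items.map (·.1)).Nodup) (hmem : (locale, v) ∈ items) (hv : v ≠ "")
    (acc : Option (Nat × String × String)) (hacc : ∀ b, acc = some b → 1 ≤ b.1) :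
    items.foldl (pvStep locale) acc = some (0, v, locale) := by
  induction items generalizing acc with
  | nil => cases hmem
  | cons p rest ih =>
    obtain ⟨loc, w⟩ := p
    rcases List.mem_cons.mp hmem with heq | hrest
    · obtain ⟨h1, h2⟩ := Prod.mk.injEq .. ▸ heq
      subst h1; subst h2
      have hr : pvRank locale locale = 0 := by simp [pvRank]
      cases acc with
      | none =>
        simp only [List.foldl, pvStep, if_pos hv, hr]
        exact fold_fix_zero rest locale v locale
      | some b =>
        have := hacc b rfl
        simp only [List.foldl, pvStep, if_pos hv, hr]
        rw [if_pos (by omega)]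
        exact fold_fix_zero rest locale v locale
    · have hne : loc ≠ locale := by
        intro h; subst h
        exact (List.nodup_cons.mp hnd).1 (by simpa using List.mem_map_of_mem (f := (·.1)) hrest)
      have hr : 1 ≤ pvRank loc locale := by unfold pvRank; rw [if_neg hne]; split_ifs <;> omega
      exact ih (List.nodup_cons.mp hnd).2 hrest _
        (step_rank_ge locale acc (loc, w) 1 hacc (fun _ => hr))

-- a rank-1 accumulator survives entries whose key is not the requested locale-with-truthy-value
theorem fold_fix_one (items : List (String × String)) (locale : String) (v l : String)
    (hno0 : ∀ w, (locale, w) ∈ items → w = "") :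
    items.foldl (pvStep locale) (some (1, v, l)) = some (1, v, l) := by
  induction items with
  | nil => rfl
  | cons p rest ih =>
    obtain ⟨loc, w⟩ := p
    simp only [List.foldl, pvStep]
    by_cases h : w ≠ ""
    · have hloc : loc ≠ locale := fun he => h (hno0 w (he ▸ List.mem_cons_self))
      have hr : 1 ≤ pvRank loc locale := by unfold pvRank; rw [if_neg hloc]; split_ifs <;> omega
      rw [if_pos h, if_neg (by omega)]
      exact ih (fun w' hw' => hno0 w' (List.mem_cons_of_mem _ hw'))
    · rw [if_neg h]
      exact ih (fun w' hw' => hno0 w' (List.mem_cons_of_mem _ hw'))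

-- if no truthy requested-locale entry but en has a truthy entry, the fold ends at (1, v, "en")
theorem fold_finds_en (items : List (String × String)) (locale v : String)
    (hnd : (items.map (·.1)).Nodup)
    (hno0 : ∀ w, (locale, w) ∈ items → w = "")
    (hmem : ("en", v) ∈ items) (hv : v ≠ "")
    (acc : Option (Nat × String × String)) (hacc : ∀ b, acc = some b → 2 ≤ b.1) :
    items.foldl (pvStep locale) acc = some (1, v, "en") := by
  induction items generalizing acc with
  | nil => cases hmem
  | cons p rest ih =>
    obtain ⟨loc, w⟩ := p
    rcases List.mem_cons.mp hmem with heq | hrest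
    · obtain ⟨h1, h2⟩ := Prod.mk.injEq .. ▸ heq
      subst h1; subst h2
      have hne : "en" ≠ locale := fun h => hv (hno0 v (h ▸ hmem))
      have hr : pvRank "en" locale = 1 := by unfold pvRank; rw [if_neg hne, if_pos rfl]
      have hrest0 : ∀ w', (locale, w') ∈ rest → w' = "" :=
        fun w' hw' => hno0 w' (List.mem_cons_of_mem _ hw')
      cases acc with
      | none =>
        simp only [List.foldl, pvStep, if_pos hv, hr]
        exact fold_fix_one rest locale v "en" hrest0
      | some b =>
        have := hacc b rfl
        simp only [List.foldl, pvStep, if_pos hv, hr]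
        rw [if_pos (by omega)]
        exact fold_fix_one rest locale v "en" hrest0
    · have hneq : loc ≠ "en" := by
        intro h; subst h
        exact (List.nodup_cons.mp hnd).1 (by simpa using List.mem_map_of_mem (f := (·.1)) hrest)
      have hr : w ≠ "" → 2 ≤ pvRank loc locale := by
        intro hw
        have hloc : loc ≠ locale := fun he => hw (hno0 w (he ▸ List.mem_cons_self))
        unfold pvRank; rw [if_neg hloc, if_neg hneq]
      exact ih (List.nodup_cons.mp hnd).2
        (fun w' hw' => hno0 w' (List.mem_cons_of_mem _ hw')) hrest _
        (step_rank_ge locale acc (loc, w) 2 hacc hr)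

-- a rank-2 accumulator survives when no later entry has a truthy locale/en key
theorem fold_fix_two (items : List (String × String)) (locale : String) (v l : String)
    (hno0 : ∀ w, (locale, w) ∈ items → w = "")
    (hno1 : ∀ w, ("en", w) ∈ items → w = "") :
    items.foldl (pvStep locale) (some (2, v, l)) = some (2, v, l) := by
  induction items with
  | nil => rfl
  | cons p rest ih =>
    obtain ⟨loc, w⟩ := p
    simp only [List.foldl, pvStep]
    have tail0 : ∀ w', (locale, w') ∈ rest → w' = "" :=
      fun w' hw' => hno0 w' (List.mem_cons_of_mem _ hw')
    have tail1 : ∀ w', ("en", w') ∈ rest → w' = "" :=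
      fun w' hw' => hno1 w' (List.mem_cons_of_mem _ hw')
    by_cases h : w ≠ ""
    · have hloc : loc ≠ locale := fun he => h (hno0 w (he ▸ List.mem_cons_self))
      have hen : loc ≠ "en" := fun he => h (hno1 w (he ▸ List.mem_cons_self))
      have hr : pvRank loc locale = 2 := by unfold pvRank; rw [if_neg hloc, if_neg hen]
      rw [if_pos h, hr, if_neg (by omega)]
      exact ih tail0 tail1
    · rw [if_neg h]
      exact ih tail0 tail1

-- if no truthy locale/en entry, the fold from none returns the first truthy entry (= pickItemsLoop)
theorem fold_rank2 (items : List (String × String)) (locale : String)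
    (hno0 : ∀ w, (locale, w) ∈ items → w = "")
    (hno1 : ∀ w, ("en", w) ∈ items → w = "") :
    (match items.foldl (pvStep locale) none with
      | none => ("", locale)
      | some b => (b.2.1, b.2.2)) = pickItemsLoop items locale := by
  induction items with
  | nil => rfl
  | cons p rest ih =>
    obtain ⟨loc, w⟩ := p
    simp only [List.foldl, pvStep, pickItemsLoop]
    have tail0 : ∀ w', (locale, w') ∈ rest → w' = "" :=
      fun w' hw' => hno0 w' (List.mem_cons_of_mem _ hw')
    have tail1 : ∀ w', ("en", w') ∈ rest → w' = "" :=
      fun w' hw' => hno1 w' (List.mem_cons_of_mem _ hw')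
    by_cases h : w ≠ ""
    · have hloc : loc ≠ locale := fun he => h (hno0 w (he ▸ List.mem_cons_self))
      have hen : loc ≠ "en" := fun he => h (hno1 w (he ▸ List.mem_cons_self))
      have hr : pvRank loc locale = 2 := by unfold pvRank; rw [if_neg hloc, if_neg hen]
      rw [if_pos h, if_pos h, hr, fold_fix_two rest locale w loc tail0 tail1]
    · rw [if_neg h, if_neg h]
      exact ih tail0 tail1

theorem pick_locale_eq (field : Option (List (String × String))) (locale : String) :
    pick_locale field locale = pick_locale_alt field locale := by
  cases field with
  | none => rfl
  | some pairs =>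
    simp only [pick_locale, pick_locale_alt, Option.getD_some]
    set d := PySem.Dict.ofList pairs with hd
    have hnd : d.keys.Nodup := PySem.Dict.nodup_keys_ofList pairs
    have hndm : (d.items.map (·.1)).Nodup := hnd
    by_cases hemp : d.items = []
    · simp [hemp]
    · rw [if_neg hemp]
      by_cases h0 : (d.get? locale).getD "" ≠ ""
      · rw [if_pos h0]
        obtain ⟨v, hv⟩ : ∃ v, d.get? locale = some v := by
          cases hg : d.get? locale with
          | none => rw [hg] at h0; simp at h0
          | some v => exact ⟨v, rfl⟩
        rw [hv] at h0; simp at h0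
        have hmem : (locale, v) ∈ d.items := PySem.Dict.mem_items_of_get?_eq_some d hv
        rw [fold_finds_locale d.items locale v hndm hmem h0 none (by intro b h; cases h)]
        simp [hv]
      · rw [if_neg h0]
        rw [not_ne_iff] at h0
        have hno0 : ∀ w, (locale, w) ∈ d.items → w = "" := by
          intro w hw
          have := PySem.Dict.get?_of_mem_items d hw hnd
          rw [this] at h0; simpa using h0
        by_cases h1 : (d.get? "en").getD "" ≠ ""
        · rw [if_pos h1]
          obtain ⟨v, hv⟩ : ∃ v, d.get? "en" = some v := by
            cases hg : d.get? "en" with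
            | none => rw [hg] at h1; simp at h1
            | some v => exact ⟨v, rfl⟩
          rw [hv] at h1; simp at h1
          have hmem : ("en", v) ∈ d.items := PySem.Dict.mem_items_of_get?_eq_some d hv
          rw [fold_finds_en d.items locale v hndm hno0 hmem h1 none (by intro b h; cases h)]
          simp [hv]
        · rw [if_neg h1]
          rw [not_ne_iff] at h1
          have hno1 : ∀ w, ("en", w) ∈ d.items → w = "" := by
            intro w hw
            have := PySem.Dict.get?_of_mem_items d hw hnd
            rw [this] at h1; simpa using h1
          exact (fold_rank2 d.items locale hno0 hno1).symm

-- ===== VERDICT (by name: the statement is the Claim_ definition above) =====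
theorem pick_locale_spec : Claim_equal_pick_locale := by
  intro field locale _
  exact pick_locale_eq field locale
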